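/-
  THE THREE WORKED EXAMPLES OF UserX/GUIDE.md. They compile; read them next to the guide.

      example 1     one integer instruction from a function's bytes: `mov r15d, [r12]` — the side goal `side_has`, the normal form
      example 2     four instructions in a row, three of them SSE: what an opaque step leaves, `SseOK` without a word about it
      example 3     `comisd` and the conditional jump after it: the compare's outcome is opaque, BOTH arms are continued
-/
import UserX.SseStep
open X86 X86.Sem X86.User

set_option linter.unusedVariables false
set_option linter.unusedSimpArgs false

namespace X86.User.GuideExamples

-- A "function" of seven instructions (29 bytes), taken from the loop body of `imdct_step3_iter0_loop`:
--    0  45 8b 3c 24          mov   r15d, [r12]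
--    4  f3 0f 10 33          movss xmm6, [rbx]
--    8  66 41 0f 6e d7       movd  xmm2, r15d
--   13  f3 0f 5c d6          subss xmm2, xmm6
--   17  f3 0f 11 74 24 08    movss [rsp+8], xmm6
--   23  66 0f 2f c8          comisd xmm1, xmm0
--   27  77 10                ja    +16
#code_bytes code_demo "458b3c24" "f30f1033" "66410f6ed7" "f30f5cd6" "f30f11742408" "660f2fc8" "7710"

-- The decode facts of its instructions, made once at command level (a farm proof imports the image's facts instead).
#code_sweep code_demo

variable {L : Layout} {μ : Microarch} {u : State} {Q : State → Prop}

/-- The code hypothesis for another state with the same memory. (Keeping `HasCode` along a walk is the WALKER's business —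
`u_walk` carries it as `Mem.EqOn` on a span; these examples step by hand.) -/
theorem hasCode_same_mem {v : State} {base : Word} {code : List Byte} (h : HasCode L u base code) (e : v.mem = u.mem) :
    HasCode L v base code := by
  unfold HasCode at *
  rw [e]
  exact h

/-! ### Example 1: one integer instruction

The goal is `Step L μ u Q`. The proof carries: the function's bytes (`h`), where RIP is (`hrip`, in the form
`base + UInt64.ofNat off`), what it knows of the registers the instruction reads (`h_r12`), and the processor (`hμ`).
`u_step_code h 0 hrip [facts]` leaves the side conditions and then `Q u'`. Here the one side condition, `L.Has r12 4`, is the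
hypothesis `hsrc`: the step closes it by itself, and `Q u'` is all that is left. -/

example (r12 : Word) (h : HasCode L u 0x100000 code_demo) (hrip : u.rip = 0x100000 + UInt64.ofNat 0)
    (h_r12 : u.reg .r12 = r12) (hμ : UserX.MicroOK μ)
    (hsrc : L.Has r12 4)
    (hQ : Q ((u.setReg .r15 (Word.ofBV (BitVec.ofNat 32 (u.mem.readLE r12 4)))).setRip 0x100004)) :
    Step L μ u Q := by
  u_step_code h 0 hrip [h_r12, hrip, hμ.vendor]
  -- ⊢ Q ((u.setReg Reg.r15 (Word.ofBV (BitVec.ofNat 32 (u.mem.readLE r12 4)))).setRip 1048580)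
  exact hQ

/-- The same without `hsrc` in the context: the side condition comes first, tagged `side_has`. -/
example (r12 : Word) (h : HasCode L u 0x100000 code_demo) (hrip : u.rip = 0x100000 + UInt64.ofNat 0)
    (h_r12 : u.reg .r12 = r12) (hμ : UserX.MicroOK μ)
    (hlive : True → L.Has r12 4)
    (hQ : ∀ v, Q v) :
    Step L μ u Q := by
  u_step_code h 0 hrip [h_r12, hrip, hμ.vendor]
  case side_has =>
    -- ⊢ L.Has r12 4          (from the check call before the access: "the address is inside a live object")
    exact hlive trivial
  case cont =>
    exact hQ _

/-! ### Example 2: four instructions, three of them SSE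

Every state is a nest of setters over THE SAME base state `u`: the facts about `u` (`h_rbx`, `h_rsp` …) serve every step.
An SSE step introduces its results as opaque variables — `x1` (a new register value, the bytes stored), `mx1` with
`hmx1 : mx1 &&& 1F80H = 1F80H` (the new MXCSR) — and the next SSE step finds `SseOK` of the state by itself. -/

example (rbx rsp : Word) (h : HasCode L u 0x100000 code_demo) (hrip : u.rip = 0x100000 + UInt64.ofNat 4)
    (h_rbx : u.reg .rbx = rbx) (h_rsp : u.reg .rsp = rsp) (h_r15 : u.reg .r15 = r15)
    (hμ : UserX.MicroOK μ) (hs : SseOK u)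
    (hsrc : L.Has rbx 4) (hslot : L.Has (rsp + 8) 4)
    (hQ : ∀ (x2 x6 : Vec) (mx : Word) (y : BitVec 32), mx &&& 0x1F80 = 0x1F80 →
      Q (((((u.writeVecLow .v128 2 x2).writeVecLow .v128 6 x6).setMxcsr mx).setMem
        (u.mem.writeLE (rsp + 8) 4 y.toNat)).setRip 0x100017)) :
    Step L μ u (fun u1 => Step L μ u1 (fun u2 => Step L μ u2 (fun u3 => Step L μ u3 Q))) := by
  -- movss xmm6, [rbx]
  u_step_code h 4 hrip [h_rbx, h_rsp, h_r15, hrip, hμ.vendor]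
  -- x1 : Vec ⊢ Step L μ ((u.writeVecLow VWidth.v128 6 x1).setRip 1048584) …
  have h1 := hasCode_same_mem (v := (u.writeVecLow .v128 6 x1).setRip 0x100008) h rfl
  have hrip1 : ((u.writeVecLow .v128 6 x1).setRip 0x100008).rip = 0x100000 + UInt64.ofNat 8 := rfl
  -- movd xmm2, r15d
  u_step_code h1 8 hrip1 [h_rbx, h_rsp, h_r15, hrip, hμ.vendor]
  -- the value of xmm6 is now shown as `x1✝` (the new `x1` shadows it): give it a name
  rename_i x6
  -- the vector registers come out in register order, whatever the order of the writes:
  -- ⊢ Step L μ (((u.writeVecLow VWidth.v128 2 x1).writeVecLow VWidth.v128 6 x6).setRip 1048589) …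
  have h2 := hasCode_same_mem (v := ((u.writeVecLow .v128 2 x1).writeVecLow .v128 6 x6).setRip 0x10000d) h rfl
  have hrip2 : (((u.writeVecLow .v128 2 x1).writeVecLow .v128 6 x6).setRip 0x10000d).rip = 0x100000 + UInt64.ofNat 13 :=
    rfl
  -- subss xmm2, xmm6: needs `SseOK` of the current state — found from `hs`, nothing to do
  u_step_code h2 13 hrip2 [h_rbx, h_rsp, h_r15, hrip, hμ.vendor]
  -- the old value of xmm2 is gone from the state AND from the context (`u_sse_tidy`):
  -- mx1 : Word, x1 : Vec, hmx1 : mx1 &&& 8064 = 8064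
  -- ⊢ Step L μ ((((u.writeVecLow VWidth.v128 2 x1).writeVecLow VWidth.v128 6 x6).setMxcsr mx1).setRip 1048593) …
  have h3 := hasCode_same_mem
    (v := (((u.writeVecLow .v128 2 x1).writeVecLow .v128 6 x6).setMxcsr mx1).setRip 0x100011) h rfl
  have hrip3 : ((((u.writeVecLow .v128 2 x1).writeVecLow .v128 6 x6).setMxcsr mx1).setRip 0x100011).rip
      = 0x100000 + UInt64.ofNat 17 := rfl
  -- movss [rsp+8], xmm6: SOME 32-bit value is stored
  u_step_code h3 17 hrip3 [h_rbx, h_rsp, h_r15, hrip, hμ.vendor]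
  exact hQ _ _ _ _ hmx1

/-! ### Example 3: a floating-point compare and the jump after it

`comisd` leaves RFLAGS as `fl.setStatus (comisStatus cmp1)`, `cmp1 : FP.Cmp` one of the four outcomes — a floating-point value is
opaque, so the proof does not know which. The `ja` after it therefore leaves TWO goals `cont`, each with `hc1` (the condition, or
its negation); a safety proof continues both. (Where the outcome matters, `cases cmp1` gives four goals in which
`Sem.comis_cf` / `comis_zf` evaluate the flags.) -/

example (fl : Flags) (h : HasCode L u 0x100000 code_demo) (hrip : u.rip = 0x100000 + UInt64.ofNat 23)
    (h_fl : u.flags = fl) (hμ : UserX.MicroOK μ) (hs : SseOK u)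
    (hTaken : ∀ (mx : Word) (c : FP.Cmp), Q (((u.setMxcsr mx).setFlags (fl.setStatus (comisStatus c))).setRip 0x10002d))
    (hNot : ∀ (mx : Word) (c : FP.Cmp), Q (((u.setMxcsr mx).setFlags (fl.setStatus (comisStatus c))).setRip 0x10001d)) :
    Step L μ u (fun u1 => Step L μ u1 Q) := by
  -- comisd xmm1, xmm0
  u_step_code h 23 hrip [h_fl, hrip, hμ.vendor]
  -- mx1 : Word, cmp1 : FP.Cmp, hmx1 : …
  -- ⊢ Step L μ (((u.setMxcsr mx1).setFlags (fl.setStatus (comisStatus cmp1))).setRip 1048603) Q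
  have h1 := hasCode_same_mem
    (v := ((u.setMxcsr mx1).setFlags (fl.setStatus (comisStatus cmp1))).setRip 0x10001b) h rfl
  have hrip1 : (((u.setMxcsr mx1).setFlags (fl.setStatus (comisStatus cmp1))).setRip 0x10001b).rip
      = 0x100000 + UInt64.ofNat 27 := rfl
  -- ja +16
  u_step_code h1 27 hrip1 [h_fl, hrip, hμ.vendor]
  · -- hc1 : the condition "above" holds of the compare's flags: the jump is taken
    exact hTaken _ _
  · -- hc1 : it does not: fall through
    exact hNot _ _

end X86.User.GuideExamples
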